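-- pv_equiv track=rewrite | github.com/trung300906/mini_project-fun- | check_phone_numbers/phone_validator/ml/classifier.py | _max_consecutive_same
-- ===== SOURCE A (Python) =====
-- def _max_consecutive_same(digits: str) -> int:
--     """Đếm chữ số giống nhau liên tiếp tối đa"""
--     if not digits:
--         return 0
--
--     max_count = 1
--     current_count = 1
--
--     for i in range(1, len(digits)):
--         if digits[i] == digits[i-1]:
--             current_count += 1
--             max_count = max(max_count, current_count)
--         else:
--             current_count = 1
--
--     return max_count
-- ===== SOURCE B (Python) =====
-- def _max_consecutive_same(digits: str) -> int:
--     """Max run length of consecutive equal characters, by a two-pointer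
--     run-jump scan: the outer loop stands on the start of each maximal run,
--     the inner loop finds its end, and the run length is j - i."""
--     n = len(digits)
--     best = 0
--     i = 0
--     while i < n:
--         j = i + 1
--         while j < n and digits[j] == digits[i]:
--             j += 1
--         if j - i > best:
--             best = j - i
--         i = j
--     return best
-- ===== Notes on version B (the rewrite author's own statement) =====
-- stated objective: alternative
-- what changed: Replaces A's per-character neighbour comparison with a running counter and running max by a two-pointer scan that jumps from run start to run start, measuring each maximal run as j - i; no current_count/max_count pair is maintained.
import Mathlib
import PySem

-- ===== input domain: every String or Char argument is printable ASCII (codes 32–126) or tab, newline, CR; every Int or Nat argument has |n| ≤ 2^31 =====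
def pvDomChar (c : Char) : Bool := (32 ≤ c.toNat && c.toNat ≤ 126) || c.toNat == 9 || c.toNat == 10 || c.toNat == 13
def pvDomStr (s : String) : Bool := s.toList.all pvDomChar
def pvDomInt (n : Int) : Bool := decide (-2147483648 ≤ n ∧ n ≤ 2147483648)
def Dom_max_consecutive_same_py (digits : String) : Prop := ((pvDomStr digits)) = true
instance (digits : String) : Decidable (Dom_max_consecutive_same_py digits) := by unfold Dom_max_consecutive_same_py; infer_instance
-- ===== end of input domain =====

-- B replaces A's running counter + running max per character by a two-pointer scan
-- that jumps from run start to run start (objective: alternative, same cost).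

-- ===== PORT A =====
-- one step of A's for-loop over i in range(1, len(digits)); state = (max_count, current_count)
def aStep (l : List Char) (s : Int × Int) (i : Int) : Int × Int :=
  if PySem.List.pyGetD l i 'a' == PySem.List.pyGetD l (i - 1) 'a' then
    (max s.1 (s.2 + 1), s.2 + 1)
  else
    (s.1, 1)

def max_consecutive_same_py (digits : String) : Int :=
  let l := digits.toList
  if l.isEmpty then 0
  else ((PySem.List.pyRange 1 (l.length : Int) 1).foldl (aStep l) (1, 1)).1

-- ===== PORT B =====
-- inner while: advance j while digits[j] == c
def bScan (l : List Char) (c : Char) (j : Nat) : Nat :=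
  if h : j < l.length then
    if l[j] == c then bScan l c (j + 1) else j
  else j
termination_by l.length - j

theorem bScan_ge (l : List Char) (c : Char) (j : Nat) : j ≤ bScan l c j := by
  fun_induction bScan l c j with
  | case1 j h hc ih => omega
  | case2 => omega
  | case3 => omega

-- outer while over run starts; best is the answer so far
def bLoop (l : List Char) (best : Int) (i : Nat) : Int :=
  if h : i < l.length then
    let j := bScan l l[i] (i + 1)
    bLoop l (if (j : Int) - (i : Int) > best then (j : Int) - (i : Int) else best) j
  else best
termination_by l.length - i
decreasing_by
  have := bScan_ge l l[i] (i + 1)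
  omega

def max_consecutive_same_py_alt (digits : String) : Int :=
  bLoop digits.toList 0 0

-- ===== PRECONDITION & SPEC =====
def Spec_max_consecutive_same_py (digits : String) (out : Int) : Prop := out = max_consecutive_same_py_alt digits
instance (digits : String) (out : Int) : Decidable (Spec_max_consecutive_same_py digits out) := by unfold Spec_max_consecutive_same_py; infer_instance

-- ===== CLAIM (what is proved, stated in full; the proofs are below) =====
def Claim_equal_max_consecutive_same_py : Prop := ∀ (digits : String), Dom_max_consecutive_same_py digits → Spec_max_consecutive_same_py digits (max_consecutive_same_py digits)

-- ===== LEMMAS AND PROOFS =====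

-- reference function: max run length, run by run
def runMax : List Char → Int
  | [] => 0
  | c :: rest =>
      max (1 + ((rest.takeWhile (· == c)).length : Int)) (runMax (rest.dropWhile (· == c)))
termination_by l => l.length
decreasing_by
  have := List.length_dropWhile_le (· == c) rest
  simp only [List.length_cons]
  omega

theorem runMax_nil : runMax [] = 0 := by rw [runMax.eq_def]

theorem runMax_cons (c : Char) (rest : List Char) :
    runMax (c :: rest)
      = max (1 + ((rest.takeWhile (· == c)).length : Int)) (runMax (rest.dropWhile (· == c))) := by
  rw [runMax.eq_def]

theorem runMax_nonneg (l : List Char) : 0 ≤ runMax l := by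
  fun_induction runMax l with
  | case1 => omega
  | case2 c rest ih =>
      have h0 : (0:Int) ≤ ((rest.takeWhile (· == c)).length : Int) := by positivity
      omega

theorem dropWhile_eq_drop (p : Char → Bool) (l : List Char) :
    l.dropWhile p = l.drop (l.takeWhile p).length := by
  induction l with
  | nil => rfl
  | cons x xs ih =>
      by_cases h : p x
      · simp [h, ih]
      · simp [h]

theorem bScan_eq (l : List Char) (c : Char) (j : Nat) :
    bScan l c j = j + ((l.drop j).takeWhile (· == c)).length := by
  fun_induction bScan l c j with
  | case1 j h hc ih =>
      rw [ih, List.drop_eq_getElem_cons h, List.takeWhile_cons, if_pos hc]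
      simp only [List.length_cons]
      omega
  | case2 j h hc =>
      rw [List.drop_eq_getElem_cons h, List.takeWhile_cons, if_neg hc]
      simp
  | case3 j h =>
      rw [List.drop_of_length_le (by omega)]
      simp

theorem bLoop_eq (l : List Char) (best : Int) (i : Nat) (hb : 0 ≤ best) :
    bLoop l best i = max best (runMax (l.drop i)) := by
  fun_induction bLoop l best i with
  | case1 best i hlt j ih =>
      have hj : j = i + 1 + ((l.drop (i+1)).takeWhile (· == l[i])).length :=
        bScan_eq l l[i] (i+1)
      simp only [dite_eq_ite] at ih
      rw [ih (by split <;> omega)]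
      rw [List.drop_eq_getElem_cons hlt, runMax_cons]
      rw [dropWhile_eq_drop, List.drop_drop]
      rw [show i + 1 + ((l.drop (i+1)).takeWhile (· == l[i])).length = j from hj.symm]
      generalize runMax (l.drop j) = R
      have hcast : (j : Int) - (i : Int) = 1 + (((l.drop (i+1)).takeWhile (· == l[i])).length : Int) := by
        omega
      rw [← hcast]
      split <;> omega
  | case2 best i hge =>
      rw [List.drop_of_length_le (by omega), runMax_nil]
      omega

-- final state of A's for-loop as structural recursion over the tail, carrying the previous char
def aGo : Char → List Char → Int × Int → Int × Int
  | _, [], s => s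
  | prev, x :: xs, s =>
      if x == prev then aGo x xs (max s.1 (s.2 + 1), s.2 + 1) else aGo x xs (s.1, 1)

theorem fold_eq_aGo (t : List Char) : ∀ (l : List Char) (i : Nat) (s : Int × Int),
    i ≤ l.length → l.drop i = t → 1 ≤ i →
    (PySem.List.pyRange (i : Int) (l.length : Int) 1).foldl (aStep l) s
      = aGo (l.getD (i - 1) 'a') t s := by
  induction t with
  | nil =>
      intro l i s hle hdrop hi
      have hlen : l.length ≤ i := by
        by_contra hlt
        rw [List.drop_eq_getElem_cons (show i < l.length by omega)] at hdrop
        exact List.cons_ne_nil _ _ hdrop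
      rw [PySem.List.pyRange_one_eq_nil (by omega)]
      rfl
  | cons x xs ih =>
      intro l i s hle hdrop hi
      have hlt : i < l.length := by
        by_contra hge
        rw [List.drop_of_length_le (by omega)] at hdrop
        exact List.cons_ne_nil _ _ hdrop.symm
      rw [List.drop_eq_getElem_cons hlt] at hdrop
      have hx : l[i] = x := (List.cons.injEq _ _ _ _ ▸ hdrop).1
      have hxs : l.drop (i + 1) = xs := (List.cons.injEq _ _ _ _ ▸ hdrop).2
      rw [PySem.List.pyRange_one_cons (by exact_mod_cast hlt), List.foldl_cons]
      have hstep : aStep l s (i : Int)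
          = if x == l.getD (i - 1) 'a' then (max s.1 (s.2 + 1), s.2 + 1) else (s.1, 1) := by
        unfold aStep
        have h1 : PySem.List.pyGetD l (i : Int) 'a' = x := by
          rw [PySem.List.pyGetD_natCast, List.getD_eq_getElem _ _ hlt, hx]
        have h2 : PySem.List.pyGetD l ((i : Int) - 1) 'a' = l.getD (i - 1) 'a' := by
          rw [show (i : Int) - 1 = ((i - 1 : Nat) : Int) by omega, PySem.List.pyGetD_natCast]
        rw [h1, h2]
      have hmain : ∀ s' : Int × Int,
          (PySem.List.pyRange ((i : Int) + 1) (l.length : Int) 1).foldl (aStep l) s'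
            = aGo x xs s' := by
        intro s'
        rw [show ((i : Int) + 1) = ((i + 1 : Nat) : Int) by omega,
            ih l (i + 1) s' (by omega) hxs (by omega)]
        congr 1
        simp only [Nat.add_sub_cancel]
        rw [List.getD_eq_getElem _ _ hlt, hx]
      rw [hstep, aGo]
      split
      · exact hmain _
      · exact hmain _

theorem aGo_fst (t : List Char) : ∀ (prev : Char) (m c : Int), 1 ≤ c → c ≤ m →
    (aGo prev t (m, c)).1
      = max m (max (c + ((t.takeWhile (· == prev)).length : Int))
               (runMax (t.dropWhile (· == prev)))) := by
  induction t with
  | nil =>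
      intro prev m c h1 h2
      simp only [aGo, List.takeWhile_nil, List.dropWhile_nil, List.length_nil]
      rw [runMax_nil]
      omega
  | cons x xs ih =>
      intro prev m c h1 h2
      rw [aGo, List.takeWhile_cons, List.dropWhile_cons]
      by_cases hxp : (x == prev) = true
      · have hx : x = prev := eq_of_beq hxp
        subst hx
        rw [if_pos hxp, if_pos hxp, if_pos hxp]
        rw [ih x (max m (c + 1)) (c + 1) (by omega) (by omega)]
        simp only [List.length_cons]
        generalize runMax (xs.dropWhile (· == x)) = R
        generalize hE : ((xs.takeWhile (· == x)).length : Int) = E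
        have hE0 : 0 ≤ E := by rw [← hE]; positivity
        push_cast
        omega
      · rw [if_neg hxp, if_neg hxp, if_neg hxp]
        rw [ih x m 1 (by omega) (by omega)]
        rw [runMax_cons]
        simp only [List.length_nil, Nat.cast_zero, add_zero]
        generalize runMax (xs.dropWhile (· == x)) = R
        generalize hE : ((xs.takeWhile (· == x)).length : Int) = E
        have hE0 : 0 ≤ E := by rw [← hE]; positivity
        omega

-- ===== VERDICT (by name: the statement is the Claim_ definition above) =====
theorem max_consecutive_same_py_spec : Claim_equal_max_consecutive_same_py := by
  intro digits _
  unfold Spec_max_consecutive_same_py max_consecutive_same_py max_consecutive_same_py_alt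
  cases hl : digits.toList with
  | nil =>
      simp only [List.isEmpty_nil, if_true]
      rw [bLoop]
      simp
  | cons x xs =>
      simp only [List.isEmpty_cons, if_false, Bool.false_eq_true]
      have hfold := fold_eq_aGo xs (x :: xs) 1 (1, 1) (by simp) (by simp) (by omega)
      simp only [Nat.cast_one] at hfold
      rw [hfold, show (x :: xs).getD (1 - 1) 'a' = x from rfl,
          aGo_fst xs x 1 1 (by omega) (by omega)]
      rw [bLoop_eq (x :: xs) 0 0 (by omega), List.drop_zero, runMax_cons]
      have hR := runMax_nonneg (xs.dropWhile (· == x))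
      set R := runMax (xs.dropWhile (· == x)) with hRe
      generalize hE : ((xs.takeWhile (· == x)).length : Int) = E
      have hE0 : 0 ≤ E := by rw [← hE]; positivity
      omega
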